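-- pv_equiv track=rewrite | github.com/JaysonHahn/CS4744-Final | fcfg_to_cfg.py | generate_value_combinations
-- ===== SOURCE A (Python) =====
-- def generate_value_combinations(variable_features):
--     """
--     Generate all combinations of feature values.
--     Each variable must have the same value across the entire production.
--     """
--     if not variable_features:
--         return [{}]
--
--     result = [{}]
--
--     # For each variable, find the intersection of possible values across all occurrences
--     for var_name, feature_entries in variable_features.items():
--         # Extract all sets of possible values for this variable
--         value_sets = [possible_values for _, possible_values in feature_entries]
--
--         # Find the intersection of all possible values for this variable
--         common_values = set.intersection(*value_sets) if value_sets else set()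
--
--         if not common_values:
--             raise ValueError(f"No common values found for variable '{var_name}' across all its occurrences.")
--
--         # Generate new combinations with each possible value
--         new_result = []
--         for combination in result:
--             for value in common_values:
--                 new_combination = combination.copy()
--
--                 # Assign the same value to all features tied to this variable
--                 for composite_key, _ in feature_entries:
--                     new_combination[composite_key] = value
--
--                 new_result.append(new_combination)
--
--         result = new_result
--
--     return result
-- ===== SOURCE B (Python) =====
-- def generate_value_combinations(variable_features):
--     # Phase 1: one pass over the variables, validating each and collecting
--     # (feature_entries, common value list) specs.
--     specs = []
--     for var_name, feature_entries in variable_features.items():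
--         value_sets = [possible_values for _, possible_values in feature_entries]
--         common_values = set.intersection(*value_sets) if value_sets else set()
--         if not common_values:
--             raise ValueError(f"No common values found for variable '{var_name}' across all its occurrences.")
--         specs.append((feature_entries, list(common_values)))
--     # Phase 2: depth-first recursion, growing a single dict along each path.
--     return _expand(specs, {})
--
--
-- def _expand(specs, current):
--     if not specs:
--         return [current]
--     feature_entries, values = specs[0]
--     out = []
--     for value in values:
--         assigned = dict(current)
--         for composite_key, _ in feature_entries:
--             assigned[composite_key] = value
--         out.extend(_expand(specs[1:], assigned))
--     return out
-- ===== Notes on version B (the rewrite author's own statement) =====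
-- stated objective: alternative
-- what changed: A rebuilds the full list of partial combinations breadth-first at every variable, copying and extending each partial dict; B first makes one validation pass collecting per-variable (entries, common-values) specs (raising on the first empty intersection like A), then generates the combinations by depth-first recursion that grows a single dict along each path.
import Mathlib
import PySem

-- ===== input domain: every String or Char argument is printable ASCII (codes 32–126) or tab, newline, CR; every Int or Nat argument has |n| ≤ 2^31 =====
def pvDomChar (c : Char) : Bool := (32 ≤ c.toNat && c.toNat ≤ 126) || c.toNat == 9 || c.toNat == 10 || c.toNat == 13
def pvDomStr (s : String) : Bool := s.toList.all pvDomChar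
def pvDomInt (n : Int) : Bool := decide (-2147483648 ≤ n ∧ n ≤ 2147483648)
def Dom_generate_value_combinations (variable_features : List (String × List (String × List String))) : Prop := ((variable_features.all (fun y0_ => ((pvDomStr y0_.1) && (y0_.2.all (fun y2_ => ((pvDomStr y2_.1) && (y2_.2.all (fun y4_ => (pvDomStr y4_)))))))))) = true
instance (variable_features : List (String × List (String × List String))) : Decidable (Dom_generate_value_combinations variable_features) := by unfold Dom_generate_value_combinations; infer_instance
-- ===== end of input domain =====

-- B replaces A's breadth-first rebuild of the whole combination list at every variable by a
-- two-phase alternative: one validation pass collecting per-variable specs, then a depth-first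
-- recursion growing a single dict along each path (objective: alternative decomposition, same cost).
-- Output-list order and dict insertion order are preserved exactly.

-- ===== PORT A =====
-- set.intersection(*value_sets): elements of the first set also in all the others (exact as a set;
-- Python's hash iteration order is not modelled — the first set's order is used).
def pyCommonValues (value_sets : List (List String)) : List String :=
  match value_sets with
  | [] => []
  | v :: rest => rest.foldl (fun acc s => PySem.Set.inter acc s) v

-- new_combination[composite_key] = value  (dict assignment on the assoc-list representation)
def pvDictSet (c : List (String × String)) (k v : String) : List (String × String) :=
  ((PySem.Dict.mk c).insert k v).items

def generate_value_combinations (variable_features : List (String × List (String × List String))) : List (List (String × String)) :=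
  if variable_features.isEmpty then [([] : List (String × String))]
  else
    variable_features.foldl (fun result p =>
      let feature_entries := p.2
      let value_sets := feature_entries.map (fun e => e.2)
      let common_values := pyCommonValues value_sets
      -- (Python raises ValueError when common_values is empty: those inputs are outside Pre_)
      result.foldl (fun new_result combination =>
        common_values.foldl (fun nr value =>
          nr ++ [feature_entries.foldl (fun c e => pvDictSet c e.1 value) combination]) new_result)
        []) [([] : List (String × String))]

-- ===== PORT B =====
def pvSpecs (variable_features : List (String × List (String × List String))) : List (List (String × List String) × List String) :=
  match variable_features with
  | [] => []
  | (_, feature_entries) :: rest =>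
      (feature_entries, pyCommonValues (feature_entries.map (fun e => e.2))) :: pvSpecs rest

def pvExpand (specs : List (List (String × List String) × List String)) (current : List (String × String)) : List (List (String × String)) :=
  match specs with
  | [] => [current]
  | (feature_entries, values) :: rest =>
      values.foldl (fun out value =>
        out ++ pvExpand rest (feature_entries.foldl (fun c e => pvDictSet c e.1 value) current)) []

def generate_value_combinations_alt (variable_features : List (String × List (String × List String))) : List (List (String × String)) :=
  pvExpand (pvSpecs variable_features) []

-- ===== PRECONDITION & SPEC =====
-- Pre_ excludes exactly the inputs on which Python A raises ValueError: some variable whose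
-- occurrence list is empty or whose value sets have no common element.
def pvHasCommon (feature_entries : List (String × List String)) : Bool :=
  match feature_entries.map (fun e => e.2) with
  | [] => false
  | s :: rest => s.any (fun v => rest.all (fun t => t.contains v))

def Pre_generate_value_combinations (variable_features : List (String × List (String × List String))) : Prop :=
  variable_features.all (fun p => pvHasCommon p.2) = true
instance (variable_features : List (String × List (String × List String))) : Decidable (Pre_generate_value_combinations variable_features) := by unfold Pre_generate_value_combinations; infer_instance

def pvWitness_generate_value_combinations : (List (String × List (String × List String))) :=
  [("X", [("NP_X", ["sg", "pl"]), ("VP_X", ["sg"])]), ("Y", [("PP_Y", ["m", "f"])])]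

def Spec_generate_value_combinations (variable_features : List (String × List (String × List String))) (out : List (List (String × String))) : Prop := out = generate_value_combinations_alt variable_features
instance (variable_features : List (String × List (String × List String))) (out : List (List (String × String))) : Decidable (Spec_generate_value_combinations variable_features out) := by unfold Spec_generate_value_combinations; infer_instance

-- ===== CLAIM (what is proved, stated in full; the proofs are below) =====
def Claim_equal_generate_value_combinations : Prop := ∀ (variable_features : List (String × List (String × List String))), Dom_generate_value_combinations variable_features → Pre_generate_value_combinations variable_features → Spec_generate_value_combinations variable_features (generate_value_combinations variable_features)

-- ===== LEMMAS AND PROOFS =====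

-- A's inner double loop is "for each combination, append one extended dict per common value".
theorem pvStepA (result : List (List (String × String))) (common : List String)
    (entries : List (String × List String)) (init : List (List (String × String))) :
    result.foldl (fun new_result combination =>
        common.foldl (fun nr value =>
          nr ++ [entries.foldl (fun c e => pvDictSet c e.1 value) combination]) new_result) init
      = init ++ result.flatMap (fun combination =>
          common.map (fun value => entries.foldl (fun c e => pvDictSet c e.1 value) combination)) := by
  have h1 : (fun (new_result : List (List (String × String))) (combination : List (String × String)) =>
      common.foldl (fun nr value =>
        nr ++ [entries.foldl (fun c e => pvDictSet c e.1 value) combination]) new_result)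
      = fun new_result combination =>
          new_result ++ common.map (fun value =>
            entries.foldl (fun c e => pvDictSet c e.1 value) combination) := by
    funext nr comb
    simp only [PySem.List.foldl_append_singleton_eq_map]
  rw [h1]
  exact PySem.List.foldl_append_eq_flatMap _ _ _

-- B's recursive step as a flatMap.
theorem pvExpand_cons (entries : List (String × List String)) (values : List String)
    (rest : List (List (String × List String) × List String)) (current : List (String × String)) :
    pvExpand ((entries, values) :: rest) current
      = values.flatMap (fun value =>
          pvExpand rest (entries.foldl (fun c e => pvDictSet c e.1 value) current)) := by
  simp [pvExpand, List.flatMap_def]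

-- A's whole fold, started from any list of partial combinations, is B's depth-first expansion.
theorem pvMain (vf : List (String × List (String × List String)))
    (R : List (List (String × String))) :
    vf.foldl (fun result p =>
      result.foldl (fun new_result combination =>
        (pyCommonValues (p.2.map (fun e => e.2))).foldl (fun nr value =>
          nr ++ [p.2.foldl (fun c e => pvDictSet c e.1 value) combination]) new_result) []) R
      = R.flatMap (fun c => pvExpand (pvSpecs vf) c) := by
  induction vf generalizing R with
  | nil => simp [pvSpecs, pvExpand]
  | cons p rest ih =>
      obtain ⟨name, entries⟩ := p
      rw [List.foldl_cons, ih, pvStepA, List.nil_append]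
      simp only [pvSpecs, pvExpand_cons]
      rw [List.flatMap_assoc]
      simp only [List.flatMap_map]

-- ===== VERDICT (by name: the statement is the Claim_ definition above) =====
theorem generate_value_combinations_spec : Claim_equal_generate_value_combinations := by
  intro vf _ _
  unfold Spec_generate_value_combinations generate_value_combinations generate_value_combinations_alt
  cases vf with
  | nil => simp [pvSpecs, pvExpand]
  | cons p rest =>
      rw [if_neg (by simp), pvMain]
      simp
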